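-- pv_equiv track=rewrite | github.com/gotdang/edabit-exercises | python/toy_car_workshop.py | cars2
-- ===== SOURCE A (Python) =====
-- WHEELS = 4
--
-- BODY = 1
--
-- FIGURES = 2
--
-- def cars2(w, b, f):
--     num_cars = 0
--     while w >= WHEELS and b >= BODY and f >= FIGURES:
--         num_cars += 1
--         w -= WHEELS
--         b -= BODY
--         f -= FIGURES
--     return num_cars
-- ===== SOURCE B (Python) =====
-- WHEELS = 4
--
-- BODY = 1
--
-- FIGURES = 2
--
-- def cars2(w, b, f):
--     return max(0, min(w // WHEELS, b // BODY, f // FIGURES))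
-- ===== Notes on version B (the rewrite author's own statement) =====
-- stated objective: faster
-- what changed: Replaces the one-car-at-a-time subtraction loop by the closed form max(0, min(w//4, b//1, f//2)).
import Mathlib
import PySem

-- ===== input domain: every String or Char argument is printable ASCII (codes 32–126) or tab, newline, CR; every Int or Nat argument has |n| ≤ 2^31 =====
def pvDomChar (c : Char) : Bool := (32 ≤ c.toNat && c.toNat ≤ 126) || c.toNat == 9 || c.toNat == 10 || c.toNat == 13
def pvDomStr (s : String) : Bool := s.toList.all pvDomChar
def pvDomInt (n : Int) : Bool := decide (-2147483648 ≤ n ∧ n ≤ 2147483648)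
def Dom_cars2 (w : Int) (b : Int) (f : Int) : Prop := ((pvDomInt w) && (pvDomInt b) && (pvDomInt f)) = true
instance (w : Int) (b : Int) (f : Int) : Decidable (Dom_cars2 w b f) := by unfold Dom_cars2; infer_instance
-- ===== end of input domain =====

-- B computes A's count by the closed form max(0, min(w//4, b//1, f//2)) instead of a loop (objective: faster).

-- ===== PORT A =====
-- the while loop of A, carrying the accumulator num_cars
def cars2Loop (w b f num_cars : Int) : Int :=
  if w ≥ 4 ∧ b ≥ 1 ∧ f ≥ 2 then
    cars2Loop (w - 4) (b - 1) (f - 2) (num_cars + 1)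
  else
    num_cars
termination_by w.toNat
decreasing_by omega

def cars2 (w : Int) (b : Int) (f : Int) : Int := cars2Loop w b f 0

-- ===== PORT B =====
def cars2_alt (w : Int) (b : Int) (f : Int) : Int :=
  max 0 (min (PySem.Int.floordiv w 4) (min (PySem.Int.floordiv b 1) (PySem.Int.floordiv f 2)))

-- ===== PRECONDITION & SPEC =====
def Spec_cars2 (w : Int) (b : Int) (f : Int) (out : Int) : Prop := out = cars2_alt w b f
instance (w : Int) (b : Int) (f : Int) (out : Int) : Decidable (Spec_cars2 w b f out) := by unfold Spec_cars2; infer_instance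

-- ===== CLAIM (what is proved, stated in full; the proofs are below) =====
def Claim_equal_cars2 : Prop := ∀ (w : Int) (b : Int) (f : Int), Dom_cars2 w b f → Spec_cars2 w b f (cars2 w b f)

-- ===== LEMMAS AND PROOFS =====
theorem cars2Loop_closed (w b f acc : Int) :
    cars2Loop w b f acc = acc + max 0 (min (w / 4) (min (b / 1) (f / 2))) := by
  induction w, b, f, acc using cars2Loop.induct with
  | case1 w b f acc h ih =>
    rw [cars2Loop, if_pos h, ih]
    omega
  | case2 w b f acc h =>
    rw [cars2Loop, if_neg h]
    omega

-- ===== VERDICT (by name: the statement is the Claim_ definition above) =====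
theorem cars2_spec : Claim_equal_cars2 := by
  intro w b f _
  unfold Spec_cars2 cars2 cars2_alt PySem.Int.floordiv
  rw [cars2Loop_closed]
  simp [Int.fdiv_eq_ediv]
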